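-- pv_equiv track=rewrite | github.com/eitanspi/polar-codes-mac | results/regenerate_plots.py | split_title
-- ===== SOURCE A (Python) =====
-- def split_title(title, max_len=60):
--     """Split title into 2 lines at a natural break if > max_len chars."""
--     if len(title) <= max_len:
--         return title
--     # Try splitting at comma nearest to middle
--     mid = len(title) // 2
--     # Find commas
--     commas = [i for i, c in enumerate(title) if c == ',']
--     if commas:
--         best = min(commas, key=lambda x: abs(x - mid))
--         return title[:best+1].strip() + '\n' + title[best+1:].strip()
--     # Try splitting at space nearest to middle
--     spaces = [i for i, c in enumerate(title) if c == ' ']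
--     if spaces:
--         best = min(spaces, key=lambda x: abs(x - mid))
--         return title[:best].strip() + '\n' + title[best+1:].strip()
--     return title
-- ===== SOURCE B (Python) =====
-- def split_title(title, max_len=60):
--     """Split title into 2 lines at a natural break if > max_len chars."""
--     if len(title) <= max_len:
--         return title
--     n = len(title)
--     mid = n // 2
--     def nearest(ch):
--         # expand outward from the middle; left of mid checked first so ties
--         # resolve to the leftmost (smallest) index
--         for d in range(n):
--             i = mid - d
--             if i >= 0 and title[i] == ch:
--                 return i
--             j = mid + d
--             if j < n and title[j] == ch:
--                 return j
--         return None
--     b = nearest(',')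
--     if b is not None:
--         return title[:b + 1].strip() + '\n' + title[b + 1:].strip()
--     b = nearest(' ')
--     if b is not None:
--         return title[:b].strip() + '\n' + title[b + 1:].strip()
--     return title
-- ===== Notes on version B (the rewrite author's own statement) =====
-- stated objective: alternative
-- what changed: Instead of materialising the list of all comma (then space) positions and taking min by distance to the middle, B expands outward from the middle index checking left before right and stops at the first hit, which is the same leftmost-tie nearest break.
import Mathlib
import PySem

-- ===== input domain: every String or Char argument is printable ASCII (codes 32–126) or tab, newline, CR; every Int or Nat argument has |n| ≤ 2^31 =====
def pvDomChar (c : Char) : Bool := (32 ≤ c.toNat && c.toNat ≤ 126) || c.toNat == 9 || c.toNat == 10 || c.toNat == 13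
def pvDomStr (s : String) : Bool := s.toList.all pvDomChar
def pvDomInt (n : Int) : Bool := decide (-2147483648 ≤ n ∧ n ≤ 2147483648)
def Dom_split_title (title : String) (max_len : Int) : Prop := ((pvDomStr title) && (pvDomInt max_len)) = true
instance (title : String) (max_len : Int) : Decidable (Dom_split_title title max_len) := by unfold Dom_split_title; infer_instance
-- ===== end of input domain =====

-- B replaces "collect all comma/space positions, then min by distance to the middle"
-- by an outward scan from the middle (left checked before right), stopping at the
-- first hit; same return value (objective: alternative decomposition).

-- ===== PORT A =====
-- 'if commas: best = min(commas, key=...)' is ported as a match on PySem.List.min?,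
-- which is none exactly when the list is empty (Python's falsy test).
def split_title (title : String) (max_len : Int) : String :=
  if PySem.Str.len title ≤ max_len then title
  else
    let mid := PySem.Int.floordiv (PySem.Str.len title) 2
    let commas := ((PySem.List.enumerate title.toList).filter (fun p => p.2 == ',')).map (fun p => p.1)
    match PySem.List.min? commas (fun x => |x - mid|) with
    | some best =>
        PySem.Str.strip (PySem.Str.slice title none (some (best + 1))) ++ "\n" ++
          PySem.Str.strip (PySem.Str.slice title (some (best + 1)) none)
    | none =>
        let spaces := ((PySem.List.enumerate title.toList).filter (fun p => p.2 == ' ')).map (fun p => p.1)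
        match PySem.List.min? spaces (fun x => |x - mid|) with
        | some best =>
            PySem.Str.strip (PySem.Str.slice title none (some best)) ++ "\n" ++
              PySem.Str.strip (PySem.Str.slice title (some (best + 1)) none)
        | none => title

-- ===== PORT B =====
-- The 'for d in range(n)' loop of Source B's nearest(): fuel counts the remaining
-- values of d.  'i >= 0' is 'd ≤ mid' in Nat; title[i] is guarded, so getD is exact.
def pvNearestAux (cs : List Char) (ch : Char) (mid : Nat) : Nat → Nat → Option Nat
  | 0, _ => none
  | fuel + 1, d =>
      if d ≤ mid ∧ cs.getD (mid - d) ' ' = ch then some (mid - d)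
      else if mid + d < cs.length ∧ cs.getD (mid + d) ' ' = ch then some (mid + d)
      else pvNearestAux cs ch mid fuel (d + 1)

def pvNearest (cs : List Char) (ch : Char) (mid : Nat) : Option Nat :=
  pvNearestAux cs ch mid cs.length 0

def split_title_alt (title : String) (max_len : Int) : String :=
  if PySem.Str.len title ≤ max_len then title
  else
    let cs := title.toList
    let mid := cs.length / 2
    match pvNearest cs ',' mid with
    | some b =>
        PySem.Str.strip (PySem.Str.slice title none (some ((b : Int) + 1))) ++ "\n" ++
          PySem.Str.strip (PySem.Str.slice title (some ((b : Int) + 1)) none)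
    | none =>
        match pvNearest cs ' ' mid with
        | some b =>
            PySem.Str.strip (PySem.Str.slice title none (some (b : Int))) ++ "\n" ++
              PySem.Str.strip (PySem.Str.slice title (some ((b : Int) + 1)) none)
        | none => title

-- ===== PRECONDITION & SPEC =====
def Spec_split_title (title : String) (max_len : Int) (out : String) : Prop := out = split_title_alt title max_len
instance (title : String) (max_len : Int) (out : String) : Decidable (Spec_split_title title max_len out) := by unfold Spec_split_title; infer_instance

-- ===== CLAIM (what is proved, stated in full; the proofs are below) =====
def Claim_equal_split_title : Prop := ∀ (title : String) (max_len : Int), Dom_split_title title max_len → Spec_split_title title max_len (split_title title max_len)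

-- ===== LEMMAS AND PROOFS =====

-- distance to the middle, in Nat
def pvDist (mid k : Nat) : Nat := if k ≤ mid then mid - k else k - mid

theorem pv_abs_eq_dist (mid k : Nat) : |((k : Nat) : Int) - ((mid : Nat) : Int)| = ((pvDist mid k : Nat) : Int) := by
  unfold pvDist
  split
  · rw [abs_of_nonpos (by omega)]; omega
  · rw [abs_of_nonneg (by omega)]; omega

theorem pv_dist_cases (mid k d : Nat) (h : pvDist mid k = d) : k = mid - d ∨ k = mid + d := by
  unfold pvDist at h; split at h <;> omega

theorem pv_dist_lt (mid k n : Nat) (hmid : mid < n) (hk : k < n) : pvDist mid k < n := by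
  unfold pvDist; split <;> omega

-- min? commutes with map
theorem pv_min?_map {α β κ : Type} [LinearOrder κ] (f : α → β) (key : β → κ) (l : List α) :
    PySem.List.min? (l.map f) key = (PySem.List.min? l (fun a => key (f a))).map f := by
  suffices h : ∀ (acc : Option α),
      (l.map f).foldl (fun acc x => match acc with | none => some x | some m => if key x < key m then some x else some m) (acc.map f)
        = (l.foldl (fun acc a => match acc with | none => some a | some m => if key (f a) < key (f m) then some a else some m) acc).map f by
    simpa [PySem.List.min?] using h none
  induction l with
  | nil => intro acc; simp
  | cons x l ih =>
      intro acc
      have hstep : (match acc.map f with | none => some (f x) | some m => if key (f x) < key m then some (f x) else some m)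
          = (match acc with | none => some x | some m => if key (f x) < key (f m) then some x else some m).map f := by
        cases acc with
        | none => rfl
        | some m => simp only [Option.map_some]; split <;> simp
      simp only [List.map_cons, List.foldl_cons, hstep, ih]

-- the folding step of Python's min(..., key=...)
def pvMinStep (key : Nat → Int) (acc : Option Nat) (x : Nat) : Option Nat :=
  match acc with | none => some x | some m => if key x < key m then some x else some m

theorem pv_min?_eq_foldl (key : Nat → Int) (l : List Nat) :
    PySem.List.min? l key = l.foldl (pvMinStep key) none := by
  unfold PySem.List.min?
  exact List.foldl_ext _ _ _ (fun acc y _ => by cases acc <;> rfl)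

-- invariant of min?'s fold on a strictly ascending list: the result is the
-- element of minimal key, ties going to the first = smallest element
theorem pv_foldl_min_inv (key : Nat → Int) :
    ∀ (l : List Nat) (m : Nat), (∀ x ∈ l, m < x) → l.Pairwise (· < ·) →
      ∃ b, l.foldl (pvMinStep key) (some m) = some b
        ∧ (b = m ∨ b ∈ l)
        ∧ (key b < key m ∨ (key b = key m ∧ b ≤ m))
        ∧ ∀ x ∈ l, key b < key x ∨ (key b = key x ∧ b ≤ x) := by
  intro l
  induction l with
  | nil =>
      intro m _ _
      exact ⟨m, rfl, Or.inl rfl, Or.inr ⟨rfl, le_rfl⟩, by simp⟩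
  | cons x l ih =>
      intro m hlt hp
      by_cases hkey : key x < key m
      · obtain ⟨b, hfold, hmem, hbx, hall⟩ := ih x (fun y hy => (List.pairwise_cons.mp hp).1 y hy) (List.pairwise_cons.mp hp).2
        have hstep : pvMinStep key (some m) x = some x := by simp [pvMinStep, hkey]
        refine ⟨b, by rw [List.foldl_cons, hstep]; exact hfold, ?_, ?_, ?_⟩
        · rcases hmem with h | h
          · exact Or.inr (by simp [h])
          · exact Or.inr (by simp [h])
        · left
          rcases hbx with h | ⟨h, _⟩
          · exact lt_trans h hkey
          · exact h ▸ hkey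
        · intro y hy
          rcases List.mem_cons.mp hy with rfl | hy'
          · exact hbx
          · exact hall y hy'
      · obtain ⟨b, hfold, hmem, hbm, hall⟩ := ih m (fun y hy => hlt y (List.mem_cons_of_mem x hy)) (List.pairwise_cons.mp hp).2
        have hstep : pvMinStep key (some m) x = some m := by simp [pvMinStep, hkey]
        refine ⟨b, by rw [List.foldl_cons, hstep]; exact hfold, ?_, hbm, ?_⟩
        · rcases hmem with h | h
          · exact Or.inl h
          · exact Or.inr (List.mem_cons_of_mem x h)
        · intro y hy
          rcases List.mem_cons.mp hy with rfl | hy'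
          · have hx : key m ≤ key y := not_lt.mp hkey
            have hmy : m < y := hlt y List.mem_cons_self
            rcases hbm with h | ⟨h, h'⟩
            · exact Or.inl (lt_of_lt_of_le h hx)
            · rcases lt_or_eq_of_le (h.le.trans hx) with h2 | h2
              · exact Or.inl h2
              · exact Or.inr ⟨h2, le_trans h' (le_of_lt hmy)⟩
          · exact hall y hy'

theorem pv_min?_sorted {l : List Nat} (key : Nat → Int) (hs : l.Pairwise (· < ·)) {b : Nat}
    (h : PySem.List.min? l key = some b) :
    b ∈ l ∧ ∀ x ∈ l, key b < key x ∨ (key b = key x ∧ b ≤ x) := by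
  rw [pv_min?_eq_foldl] at h
  cases l with
  | nil => simp at h
  | cons x l =>
      obtain ⟨b', hfold, hmem, hbx, hall⟩ :=
        pv_foldl_min_inv key l x (fun y hy => (List.pairwise_cons.mp hs).1 y hy) (List.pairwise_cons.mp hs).2
      rw [List.foldl_cons] at h
      have hstep : pvMinStep key none x = some x := rfl
      rw [hstep, hfold] at h
      have hb' : b' = b := Option.some.inj h
      subst hb'
      refine ⟨?_, ?_⟩
      · rcases hmem with h' | h'
        · simp [h']
        · exact List.mem_cons_of_mem x h'
      · intro y hy
        rcases List.mem_cons.mp hy with rfl | hy'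
        · exact hbx
        · exact hall y hy'

-- the comprehension '[i for i, c in enumerate(title) if c == ch]'
theorem pv_commas_eq (cs : List Char) (ch : Char) :
    ((PySem.List.enumerate cs).filter (fun p => p.2 == ch)).map (fun p => p.1)
      = ((List.range cs.length).filter (fun k => cs.getD k ' ' == ch)).map (fun k => ((k : Nat) : Int)) := by
  rw [PySem.List.enumerate_eq_map_pyRange cs ' ', PySem.List.len_eq, PySem.List.pyRange_zero_nat]
  simp [List.map_map, List.filter_map, Function.comp_def]

-- spec of the outward scan: some b means b is a position of ch of minimal
-- distance to mid (ties to the smaller index); none means ch occurs nowhere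
theorem pv_nearestAux_spec (cs : List Char) (ch : Char) (mid : Nat) (hmid : mid < cs.length) :
    ∀ (fuel d : Nat), fuel + d = cs.length →
      (∀ k, k < cs.length → cs.getD k ' ' = ch → d ≤ pvDist mid k) →
      (match pvNearestAux cs ch mid fuel d with
       | some b => b < cs.length ∧ cs.getD b ' ' = ch ∧
           ∀ k, k < cs.length → cs.getD k ' ' = ch →
             (pvDist mid b < pvDist mid k ∨ (pvDist mid b = pvDist mid k ∧ b ≤ k))
       | none => ∀ k, k < cs.length → ¬ cs.getD k ' ' = ch) := by
  intro fuel
  induction fuel with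
  | zero =>
      intro d hd hno
      simp only [pvNearestAux]
      intro k hk hch
      have h1 := hno k hk hch
      have h2 := pv_dist_lt mid k cs.length hmid hk
      omega
  | succ fuel ih =>
      intro d hd hno
      simp only [pvNearestAux]
      by_cases h1 : d ≤ mid ∧ cs.getD (mid - d) ' ' = ch
      · rw [if_pos h1]
        have hdb : pvDist mid (mid - d) = d := by unfold pvDist; split <;> omega
        refine ⟨by omega, h1.2, ?_⟩
        intro k hk hch
        have hdk := hno k hk hch
        by_cases hlt : pvDist mid (mid - d) < pvDist mid k
        · exact Or.inl hlt
        · have hkd : pvDist mid k = d := by omega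
          rcases pv_dist_cases mid k d hkd with rfl | rfl
          · exact Or.inr ⟨by omega, le_rfl⟩
          · exact Or.inr ⟨by omega, by omega⟩
      · rw [if_neg h1]
        by_cases h2 : mid + d < cs.length ∧ cs.getD (mid + d) ' ' = ch
        · rw [if_pos h2]
          have hdb : pvDist mid (mid + d) = d := by unfold pvDist; split <;> omega
          refine ⟨h2.1, h2.2, ?_⟩
          intro k hk hch
          have hdk := hno k hk hch
          by_cases hlt : pvDist mid (mid + d) < pvDist mid k
          · exact Or.inl hlt
          · have hkd : pvDist mid k = d := by omega
            rcases pv_dist_cases mid k d hkd with rfl | rfl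
            · by_cases hdm : d ≤ mid
              · exact absurd ⟨hdm, hch⟩ h1
              · exfalso; unfold pvDist at hkd; split at hkd <;> omega
            · exact Or.inr ⟨rfl, le_rfl⟩
        · rw [if_neg h2]
          refine ih (d + 1) (by omega) ?_
          intro k hk hch
          have hdk := hno k hk hch
          by_cases hlt : d < pvDist mid k
          · omega
          · exfalso
            have hkd : pvDist mid k = d := by omega
            rcases pv_dist_cases mid k d hkd with rfl | rfl
            · by_cases hdm : d ≤ mid
              · exact h1 ⟨hdm, hch⟩
              · unfold pvDist at hkd; split at hkd <;> omega
            · exact h2 ⟨hk, hch⟩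

-- the two searches agree
theorem pv_search_eq (cs : List Char) (ch : Char) (hn : cs ≠ []) :
    PySem.List.min?
      (((PySem.List.enumerate cs).filter (fun p => p.2 == ch)).map (fun p => p.1))
      (fun x => |x - ((cs.length / 2 : Nat) : Int)|)
      = (pvNearest cs ch (cs.length / 2)).map (fun b => ((b : Nat) : Int)) := by
  have hlen : 0 < cs.length := List.length_pos_iff.mpr hn
  have hmid : cs.length / 2 < cs.length := Nat.div_lt_self hlen (by omega)
  set mid := cs.length / 2 with hmiddef
  rw [pv_commas_eq, pv_min?_map]
  have hspec := pv_nearestAux_spec cs ch mid hmid cs.length 0 (by omega) (fun k _ _ => Nat.zero_le _)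
  rw [show pvNearest cs ch mid = pvNearestAux cs ch mid cs.length 0 from rfl]
  cases hB : pvNearestAux cs ch mid cs.length 0 with
  | none =>
      rw [hB] at hspec
      have hR : (List.range cs.length).filter (fun k => cs.getD k ' ' == ch) = [] := by
        rw [List.filter_eq_nil_iff]
        intro k hk
        simp only [List.mem_range] at hk
        simpa using hspec k hk
      rw [hR]
      rfl
  | some b =>
      rw [hB] at hspec
      obtain ⟨hb1, hb2, hb3⟩ := hspec
      have hbmem : b ∈ (List.range cs.length).filter (fun k => cs.getD k ' ' == ch) := by
        simp only [List.mem_filter, List.mem_range, beq_iff_eq]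
        exact ⟨hb1, hb2⟩
      cases hA : PySem.List.min? ((List.range cs.length).filter (fun k => cs.getD k ' ' == ch))
          (fun a => |((a : Nat) : Int) - ((mid : Nat) : Int)|) with
      | none =>
          rw [PySem.List.min?_eq_none_iff] at hA
          rw [hA] at hbmem
          simp at hbmem
      | some a =>
          have hsorted : ((List.range cs.length).filter (fun k => cs.getD k ' ' == ch)).Pairwise (· < ·) :=
            (List.pairwise_lt_range).filter _
          obtain ⟨hamem, hbest⟩ := pv_min?_sorted _ hsorted hA
          have hamem' : a < cs.length ∧ cs.getD a ' ' = ch := by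
            simpa only [List.mem_filter, List.mem_range, beq_iff_eq] using hamem
          have h1 := hbest b hbmem
          have h2 := hb3 a hamem'.1 hamem'.2
          rw [pv_abs_eq_dist, pv_abs_eq_dist] at h1
          have hab : a = b := by omega
          rw [hab]

-- ===== VERDICT (by name: the statement is the Claim_ definition above) =====
theorem split_title_spec : Claim_equal_split_title := by
  intro title max_len _
  unfold Spec_split_title split_title split_title_alt
  by_cases hguard : PySem.Str.len title ≤ max_len
  · rw [if_pos hguard, if_pos hguard]
  · rw [if_neg hguard, if_neg hguard]
    by_cases hnil : title.toList = []
    · simp [hnil, pvNearest, pvNearestAux, PySem.List.min?]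
    · have hmid : PySem.Int.floordiv (PySem.Str.len title) 2 = ((title.toList.length / 2 : Nat) : Int) := by
        rw [PySem.Str.len_eq]
        exact_mod_cast PySem.Int.floordiv_natCast title.toList.length 2
      dsimp only
      rw [hmid, pv_search_eq title.toList ',' hnil]
      cases h1 : pvNearest title.toList ',' (title.toList.length / 2) with
      | some b => rfl
      | none =>
          simp only [Option.map_none]
          rw [pv_search_eq title.toList ' ' hnil]
          cases h2 : pvNearest title.toList ' ' (title.toList.length / 2) with
          | some b => rfl
          | none => rfl
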